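-- pv_equiv track=rewrite | github.com/HannaZhuravskaya/adventofcode-2023 | src/14.2.py | moveHorizontally
-- ===== SOURCE A (Python) =====
-- def findNextFreeSpotH(startIndex, lines, row, dir):
--     cur = startIndex
--     for j in range(cur + dir[0], dir[2], dir[0]):
--         if lines[row][cur] != '.':
--             cur = j
--         else:
--             break
--     return cur
--
-- def moveHorizontally(lines, rows, cols, dir):
--     for i in range(0, rows):
--         freeSpot = findNextFreeSpotH(dir[1], lines, i, dir)
--         for j in range(freeSpot + dir[0], dir[2], dir[0]):
--             if freeSpot == cols:
--                 break
--             if lines[i][j] == 'O' and freeSpot * dir[0] < j * dir[0]: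
--                 lines[i][freeSpot] = 'O'
--                 lines[i][j] = '.'
--                 freeSpot = findNextFreeSpotH(freeSpot + dir[0], lines, i, dir)
--             elif lines[i][j] == '#':
--                 freeSpot = findNextFreeSpotH(j + dir[0], lines, i, dir)
--     return lines
-- ===== SOURCE B (Python) =====
-- def _rollWest(row):
--     # one pass: count 'O's and segment length between '#' walls, emit packed segments
--     out = []
--     o = 0
--     seglen = 0
--     for c in row:
--         if c == '#':
--             out += ['O'] * o + ['.'] * (seglen - o) + ['#']
--             o = 0
--             seglen = 0
--         else:
--             if c == 'O':
--                 o += 1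
--             seglen += 1
--     out += ['O'] * o + ['.'] * (seglen - o)
--     return out
--
-- def moveHorizontally(lines, rows, cols, dir):
--     for i in range(rows):
--         if dir[0] == 1:
--             lines[i] = _rollWest(lines[i])
--         else:
--             lines[i] = _rollWest(lines[i][::-1])[::-1]
--     return lines
-- ===== Notes on version B (the rewrite author's own statement) =====
-- stated objective: faster
-- what changed: Replaced A's per-move rescanning for the next free slot (findNextFreeSpotH after every rock move, with explicit index juggling driven by the dir vector) by a single left-to-right pass per row that counts 'O's per '#'-delimited segment and emits each segment packed ('O's first for a west tilt; the row is reversed for an east tilt).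
-- outside the precondition, e.g. on moveHorizontally([['X', 'O']], 1, 2, (1, 0, 2)): A returns [['X', 'O']], B returns [['O', '.']]; on moveHorizontally([['.', 'O']], 1, 2, (1, 0, 1)): A returns [['.', 'O']], B returns [['O', '.']]; on moveHorizontally([['.', '.', 'O']], 1, 2, (1, 0, 2)): A returns [['.', '.', 'O']], B returns [['O', '.', '.']]
import Mathlib
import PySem

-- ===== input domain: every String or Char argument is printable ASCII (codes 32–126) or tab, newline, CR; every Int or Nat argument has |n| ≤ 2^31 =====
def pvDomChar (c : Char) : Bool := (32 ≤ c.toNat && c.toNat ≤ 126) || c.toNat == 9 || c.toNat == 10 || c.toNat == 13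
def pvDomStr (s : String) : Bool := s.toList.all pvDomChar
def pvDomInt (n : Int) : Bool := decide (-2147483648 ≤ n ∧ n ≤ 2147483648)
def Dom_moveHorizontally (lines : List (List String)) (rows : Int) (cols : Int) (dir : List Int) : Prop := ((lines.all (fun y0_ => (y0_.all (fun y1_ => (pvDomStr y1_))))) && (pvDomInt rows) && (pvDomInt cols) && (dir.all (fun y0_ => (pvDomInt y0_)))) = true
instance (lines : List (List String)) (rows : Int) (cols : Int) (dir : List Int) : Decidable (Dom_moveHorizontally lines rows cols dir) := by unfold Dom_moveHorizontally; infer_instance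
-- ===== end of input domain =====

-- B replaces A's quadratic per-row rescanning (findNextFreeSpotH after every rock move) by a
-- single per-row pass that packs each '#'-delimited segment; equivalence is about the RETURN
-- value only (the Python A mutates the row lists of `lines` in place, B rebinds lines[i]).


-- ===== PORT A =====
-- the 'for j in range(...)' loop of findNextFreeSpotH, with early break
def findGoA (lines : List (List String)) (row : Int) : Int → List Int → Int
  | cur, [] => cur
  | cur, j :: rest =>
    if PySem.List.pyGetD (PySem.List.pyGetD lines row []) cur "" ≠ "." then
      findGoA lines row j rest
    else cur

def findNextFreeSpotH (startIndex : Int) (lines : List (List String)) (row : Int) (dir : List Int) : Int :=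
  findGoA lines row startIndex
    (PySem.List.pyRange (startIndex + PySem.List.pyGetD dir 0 0) (PySem.List.pyGetD dir 2 0)
      (PySem.List.pyGetD dir 0 0))

-- the inner 'for j in range(...)' loop of moveHorizontally (body of row i), with the break
def moveGoA (dirv : List Int) (cols : Int) (i : Int) :
    List (List String) → Int → List Int → List (List String)
  | lines, _, [] => lines
  | lines, freeSpot, j :: rest =>
    if freeSpot = cols then lines
    else if PySem.List.pyGetD (PySem.List.pyGetD lines i []) j "" = "O" ∧
        freeSpot * PySem.List.pyGetD dirv 0 0 < j * PySem.List.pyGetD dirv 0 0 then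
      -- lines[i][freeSpot] = 'O'; lines[i][j] = '.'
      let lines1 := PySem.List.pySetD lines i
        (PySem.List.pySetD (PySem.List.pyGetD lines i []) freeSpot "O")
      let lines2 := PySem.List.pySetD lines1 i
        (PySem.List.pySetD (PySem.List.pyGetD lines1 i []) j ".")
      moveGoA dirv cols i lines2
        (findNextFreeSpotH (freeSpot + PySem.List.pyGetD dirv 0 0) lines2 i dirv) rest
    else if PySem.List.pyGetD (PySem.List.pyGetD lines i []) j "" = "#" then
      moveGoA dirv cols i lines
        (findNextFreeSpotH (j + PySem.List.pyGetD dirv 0 0) lines i dirv) rest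
    else moveGoA dirv cols i lines freeSpot rest

def moveHorizontally (lines : List (List String)) (rows : Int) (cols : Int) (dir : List Int) :
    List (List String) :=
  (PySem.List.pyRange 0 rows 1).foldl (fun ls i =>
    let freeSpot := findNextFreeSpotH (PySem.List.pyGetD dir 1 0) ls i dir
    moveGoA dir cols i ls freeSpot
      (PySem.List.pyRange (freeSpot + PySem.List.pyGetD dir 0 0) (PySem.List.pyGetD dir 2 0)
        (PySem.List.pyGetD dir 0 0))) lines

-- ===== PORT B =====
-- the 'for c in row' loop of _rollWest: count 'O's (o) and cells (seglen) per '#'-segment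
def rollGoB : List String → Nat → Nat → List String → List String
  | [], o, seglen, out => out ++ List.replicate o "O" ++ List.replicate (seglen - o) "."
  | c :: rest, o, seglen, out =>
    if c = "#" then
      rollGoB rest 0 0 (out ++ List.replicate o "O" ++ List.replicate (seglen - o) "." ++ ["#"])
    else rollGoB rest (if c = "O" then o + 1 else o) (seglen + 1) out

def rollWest (row : List String) : List String := rollGoB row 0 0 []

-- lines[i][::-1] is ported as List.reverse (exact: PySem.List.slice?_none_none_neg_one)
def moveHorizontally_alt (lines : List (List String)) (rows : Int) (cols : Int) (dir : List Int) :
    List (List String) :=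
  (PySem.List.pyRange 0 rows 1).foldl (fun ls i =>
    if PySem.List.pyGetD dir 0 0 = 1 then
      PySem.List.pySetD ls i (rollWest (PySem.List.pyGetD ls i []))
    else
      PySem.List.pySetD ls i ((rollWest (PySem.List.pyGetD ls i []).reverse).reverse)) lines

-- ===== PRECONDITION & SPEC =====
-- Pre_ restricts to the function's natural domain (plus the trivial rows ≤ 0 case, where the row
-- loop is empty): a grid of single-character '.'/'#'/'O' cells whose first `rows` rows have length
-- `cols`, tilted with one of the two horizontal direction vectors [1,0,cols] / [-1,cols-1,-1] the
-- script calls it with; outside it A raises (bad indices, step 0) or returns accidental partial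
-- tilts of inputs no caller means (wrong cell alphabet, dir bounds not matching the grid).
def Pre_moveHorizontally (lines : List (List String)) (rows : Int) (cols : Int) (dir : List Int) : Prop :=
  rows ≤ 0 ∨
  (0 < rows ∧ rows ≤ (lines.length : Int) ∧
    (∀ row ∈ lines.take rows.toNat,
      (row.length : Int) = cols ∧ ∀ c ∈ row, c = "." ∨ c = "#" ∨ c = "O") ∧
    (dir = [1, 0, cols] ∨ dir = [-1, cols - 1, -1]))

instance (lines : List (List String)) (rows : Int) (cols : Int) (dir : List Int) :
    Decidable (Pre_moveHorizontally lines rows cols dir) := by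
  unfold Pre_moveHorizontally; infer_instance

def pvWitness_moveHorizontally : List (List String) × Int × Int × List Int :=
  ([[".", "O"], ["#", "O"]], 2, 2, [1, 0, 2])

def Spec_moveHorizontally (lines : List (List String)) (rows : Int) (cols : Int) (dir : List Int) (out : List (List String)) : Prop := out = moveHorizontally_alt lines rows cols dir
instance (lines : List (List String)) (rows : Int) (cols : Int) (dir : List Int) (out : List (List String)) : Decidable (Spec_moveHorizontally lines rows cols dir out) := by unfold Spec_moveHorizontally; infer_instance

-- ===== CLAIM (what is proved, stated in full; the proofs are below) =====
def Claim_equal_moveHorizontally : Prop := ∀ (lines : List (List String)) (rows : Int) (cols : Int) (dir : List Int), Dom_moveHorizontally lines rows cols dir → Pre_moveHorizontally lines rows cols dir → Spec_moveHorizontally lines rows cols dir (moveHorizontally lines rows cols dir)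

-- ===== LEMMAS AND PROOFS =====

-- cell validity
def OkCell (s : String) : Prop := s = "." ∨ s = "#" ∨ s = "O"

-- A's find loop, reading a fixed row
def rowFind (r : List String) : Int → List Int → Int
  | cur, [] => cur
  | cur, j :: rest => if PySem.List.pyGetD r cur "" ≠ "." then rowFind r j rest else cur

lemma findGoA_eq_rowFind (lines : List (List String)) (row : Int) :
    ∀ (js : List Int) (cur : Int),
      findGoA lines row cur js = rowFind (PySem.List.pyGetD lines row []) cur js := by
  intro js
  induction js with
  | nil => intro cur; rfl
  | cons j rest ih =>
    intro cur
    simp only [findGoA, rowFind]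
    split <;> simp [ih]

-- A's inner loop specialised to a west tilt (dir = [1,0,n], cols = n), acting on one row
def rowLoopW (n : Int) : List String → Int → List Int → List String
  | r, _, [] => r
  | r, fs, j :: rest =>
    if fs = n then r
    else if PySem.List.pyGetD r j "" = "O" ∧ fs < j then
      let r2 := PySem.List.pySetD (PySem.List.pySetD r fs "O") j "."
      rowLoopW n r2 (rowFind r2 (fs + 1) (PySem.List.pyRange (fs + 1 + 1) n 1)) rest
    else if PySem.List.pyGetD r j "" = "#" then
      rowLoopW n r (rowFind r (j + 1) (PySem.List.pyRange (j + 1 + 1) n 1)) rest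
    else rowLoopW n r fs rest

-- A's inner loop specialised to an east tilt (dir = [-1,n-1,-1], cols = n)
def rowLoopE (n : Int) : List String → Int → List Int → List String
  | r, _, [] => r
  | r, fs, j :: rest =>
    if fs = n then r
    else if PySem.List.pyGetD r j "" = "O" ∧ j < fs then
      let r2 := PySem.List.pySetD (PySem.List.pySetD r fs "O") j "."
      rowLoopE n r2 (rowFind r2 (fs - 1) (PySem.List.pyRange (fs - 1 - 1) (-1) (-1))) rest
    else if PySem.List.pyGetD r j "" = "#" then
      rowLoopE n r (rowFind r (j - 1) (PySem.List.pyRange (j - 1 - 1) (-1) (-1))) rest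
    else rowLoopE n r fs rest

-- whole-row A functions
def rowWestA (c : Int) (r : List String) : List String :=
  rowLoopW c r (rowFind r 0 (PySem.List.pyRange 1 c 1))
    (PySem.List.pyRange (rowFind r 0 (PySem.List.pyRange 1 c 1) + 1) c 1)

def rowEastA (c : Int) (r : List String) : List String :=
  rowLoopE c r (rowFind r (c - 1) (PySem.List.pyRange (c - 1 - 1) (-1) (-1)))
    (PySem.List.pyRange (rowFind r (c - 1) (PySem.List.pyRange (c - 1 - 1) (-1) (-1)) - 1) (-1) (-1))

-- in-range pySetD/pyGetD facts
lemma pySetD_pySetD (ls : List (List String)) (i : Int) (v w : List String) (h0 : 0 ≤ i) :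
    PySem.List.pySetD (PySem.List.pySetD ls i v) i w = PySem.List.pySetD ls i w := by
  simp only [PySem.List.pySetD_of_nonneg _ _ h0, List.set_set]

lemma pyGetD_pySetD_self (ls : List (List String)) (i : Int) (v : List String)
    (h0 : 0 ≤ i) (h1 : i < (ls.length : Int)) :
    PySem.List.pyGetD (PySem.List.pySetD ls i v) i [] = v := by
  rw [PySem.List.pySetD_of_nonneg _ _ h0,
    PySem.List.pyGetD_eq_getElem _ _ h0 (by simpa using h1)]
  simp

lemma pySetD_getD_self (ls : List (List String)) (i : Int)
    (h0 : 0 ≤ i) (h1 : i < (ls.length : Int)) :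
    PySem.List.pySetD ls i (PySem.List.pyGetD ls i []) = ls := by
  rw [PySem.List.pyGetD_eq_getElem _ _ h0 h1, PySem.List.pySetD_of_nonneg _ _ h0]
  exact List.set_getElem_self ..

lemma length_pySetD_int (ls : List (List String)) (i : Int) (v : List String) :
    ((PySem.List.pySetD ls i v).length : Int) = (ls.length : Int) := by
  simp [PySem.List.length_pySetD]

-- bridges: moveGoA touches only row i
lemma moveGoA_west (c : Int) (i : Int) :
    ∀ (js : List Int) (lines : List (List String)) (fs : Int),
      0 ≤ i → i < (lines.length : Int) →
      moveGoA [1, 0, c] c i lines fs js =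
        PySem.List.pySetD lines i (rowLoopW c (PySem.List.pyGetD lines i []) fs js) := by
  intro js
  induction js with
  | nil =>
    intro lines fs h0 h1
    show lines = PySem.List.pySetD lines i (PySem.List.pyGetD lines i [])
    rw [pySetD_getD_self lines i h0 h1]
  | cons j rest ih =>
    intro lines fs h0 h1
    have hg0 : PySem.List.pyGetD ([1, 0, c] : List Int) 0 0 = 1 := by
      simp [PySem.List.pyGetD]
    have hg2 : PySem.List.pyGetD ([1, 0, c] : List Int) 2 0 = c := by
      simp [PySem.List.pyGetD]
    simp only [moveGoA, rowLoopW, findNextFreeSpotH, hg0, hg2, mul_one]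
    by_cases hfs : fs = c
    · rw [if_pos hfs, if_pos hfs, pySetD_getD_self lines i h0 h1]
    · rw [if_neg hfs, if_neg hfs]
      by_cases hO : PySem.List.pyGetD (PySem.List.pyGetD lines i []) j "" = "O" ∧ fs < j
      · rw [if_pos hO, if_pos hO]
        rw [pyGetD_pySetD_self lines i _ h0 h1, pySetD_pySetD lines i _ _ h0]
        rw [findGoA_eq_rowFind, pyGetD_pySetD_self lines i _ h0 h1]
        rw [ih (PySem.List.pySetD lines i
            (PySem.List.pySetD (PySem.List.pySetD (PySem.List.pyGetD lines i []) fs "O") j ".")) _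
          h0 (by rw [length_pySetD_int]; exact h1)]
        rw [pyGetD_pySetD_self lines i _ h0 h1, pySetD_pySetD lines i _ _ h0]
      · rw [if_neg hO, if_neg hO]
        by_cases hH : PySem.List.pyGetD (PySem.List.pyGetD lines i []) j "" = "#"
        · rw [if_pos hH, if_pos hH, findGoA_eq_rowFind, ih lines _ h0 h1]
        · rw [if_neg hH, if_neg hH, ih lines fs h0 h1]

lemma moveGoA_east (c : Int) (i : Int) :
    ∀ (js : List Int) (lines : List (List String)) (fs : Int),
      0 ≤ i → i < (lines.length : Int) →
      moveGoA [-1, c - 1, -1] c i lines fs js =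
        PySem.List.pySetD lines i (rowLoopE c (PySem.List.pyGetD lines i []) fs js) := by
  intro js
  induction js with
  | nil =>
    intro lines fs h0 h1
    show lines = PySem.List.pySetD lines i (PySem.List.pyGetD lines i [])
    rw [pySetD_getD_self lines i h0 h1]
  | cons j rest ih =>
    intro lines fs h0 h1
    have hg0 : PySem.List.pyGetD ([-1, c - 1, -1] : List Int) 0 0 = -1 := by
      simp [PySem.List.pyGetD]
    have hg2 : PySem.List.pyGetD ([-1, c - 1, -1] : List Int) 2 0 = -1 := by
      simp [PySem.List.pyGetD]
    have hmul : ∀ x y : Int, x * -1 < y * -1 ↔ y < x := by intro x y; omega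
    simp only [moveGoA, rowLoopE, findNextFreeSpotH, hg0, hg2, hmul,
      show ∀ x : Int, x + -1 = x - 1 from fun x => by ring]
    by_cases hfs : fs = c
    · rw [if_pos hfs, if_pos hfs, pySetD_getD_self lines i h0 h1]
    · rw [if_neg hfs, if_neg hfs]
      by_cases hO : PySem.List.pyGetD (PySem.List.pyGetD lines i []) j "" = "O" ∧ j < fs
      · rw [if_pos hO, if_pos hO]
        rw [pyGetD_pySetD_self lines i _ h0 h1, pySetD_pySetD lines i _ _ h0]
        rw [findGoA_eq_rowFind, pyGetD_pySetD_self lines i _ h0 h1]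
        rw [ih (PySem.List.pySetD lines i
            (PySem.List.pySetD (PySem.List.pySetD (PySem.List.pyGetD lines i []) fs "O") j ".")) _
          h0 (by rw [length_pySetD_int]; exact h1)]
        rw [pyGetD_pySetD_self lines i _ h0 h1, pySetD_pySetD lines i _ _ h0]
      · rw [if_neg hO, if_neg hO]
        by_cases hH : PySem.List.pyGetD (PySem.List.pyGetD lines i []) j "" = "#"
        · rw [if_pos hH, if_pos hH, findGoA_eq_rowFind, ih lines _ h0 h1]
        · rw [if_neg hH, if_neg hH, ih lines fs h0 h1]

-- outer loop: apply F to the first k rows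
def appFirst (F : List String → List String) (k : Nat) (ls : List (List String)) :
    List (List String) :=
  (ls.take k).map F ++ ls.drop k

lemma length_appFirst (F : List String → List String) (k : Nat) (ls : List (List String)) :
    (appFirst F k ls).length = ls.length := by
  simp [appFirst]; omega

lemma appFirst_zero (G : List String → List String) (ls : List (List String)) :
    appFirst G 0 ls = ls := by
  simp [appFirst]

lemma appFirst_cons (G : List String → List String) (k : Nat) (x : List String)
    (t : List (List String)) : appFirst G (k + 1) (x :: t) = G x :: appFirst G k t := by
  simp [appFirst]

lemma appFirst_getD (G : List String → List String) :
    ∀ (k : Nat) (ls : List (List String)), k < ls.length →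
      (appFirst G k ls).getD k [] = ls.getD k [] := by
  intro k
  induction k with
  | zero => intro ls _; rw [appFirst_zero]
  | succ k ih =>
    intro ls h
    cases ls with
    | nil => simp at h
    | cons x t =>
      rw [appFirst_cons]
      simp only [List.getD_cons_succ]
      exact ih t (by simpa using h)

lemma appFirst_set (G : List String → List String) :
    ∀ (k : Nat) (ls : List (List String)), k < ls.length →
      (appFirst G k ls).set k (G (ls.getD k [])) = appFirst G (k + 1) ls := by
  intro k
  induction k with
  | zero =>
    intro ls h
    cases ls with
    | nil => simp at h
    | cons x t =>
      rw [appFirst_zero, appFirst_cons, appFirst_zero]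
      simp [List.getD_cons_zero]
  | succ k ih =>
    intro ls h
    cases ls with
    | nil => simp at h
    | cons x t =>
      rw [appFirst_cons, appFirst_cons]
      simp only [List.getD_cons_succ, List.set_cons_succ]
      rw [ih t (by simpa using h)]

lemma foldl_pyRange_appFirst (body : List (List String) → Int → List (List String))
    (G : List String → List String)
    (hbody : ∀ (ls : List (List String)) (i : Nat), i < ls.length →
      body ls (i : Int) = PySem.List.pySetD ls (i : Int) (G (PySem.List.pyGetD ls (i : Int) []))) :
    ∀ (k : Nat) (ls : List (List String)), k ≤ ls.length →
      (PySem.List.pyRange 0 (k : Int) 1).foldl body ls = appFirst G k ls := by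
  intro k
  induction k with
  | zero =>
    intro ls _
    rw [show ((0 : Nat) : Int) = 0 from rfl, PySem.List.pyRange_one_eq_nil le_rfl,
      appFirst_zero]
    rfl
  | succ k ih =>
    intro ls hk
    have hc : ((k + 1 : Nat) : Int) = (k : Int) + 1 := by push_cast; ring
    rw [hc, PySem.List.pyRange_one_succ_right (by positivity), List.foldl_append,
      ih ls (by omega)]
    simp only [List.foldl_cons, List.foldl_nil]
    have hklt : k < ls.length := by omega
    rw [hbody (appFirst G k ls) k (by rw [length_appFirst]; omega)]
    rw [PySem.List.pyGetD_natCast, PySem.List.pySetD_natCast, appFirst_getD G k ls hklt,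
      appFirst_set G k ls hklt]

lemma appFirst_congr (F G : List String → List String) (k : Nat) (ls : List (List String))
    (h : ∀ row ∈ ls.take k, F row = G row) : appFirst F k ls = appFirst G k ls := by
  unfold appFirst
  rw [List.map_congr_left h]

-- getD/set on an explicit decomposition
lemma getD_append_len {α : Type} (X Y : List α) (y d : α) (m : Nat) (hm : X.length = m) :
    (X ++ y :: Y).getD m d = y := by
  subst hm; induction X with
  | nil => rfl
  | cons x X ih => simpa using ih

lemma set_append_len {α : Type} (X Y : List α) (y v : α) (m : Nat) (hm : X.length = m) :
    (X ++ y :: Y).set m v = X ++ v :: Y := by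
  subst hm; induction X with
  | nil => rfl
  | cons x X ih => simpa using ih

lemma getD_replicate_zone (p X : List String) (v : String) (a s t : Nat) (hp : p.length = s)
    (h1 : s ≤ t) (h2 : t < s + a) :
    (p ++ List.replicate a v ++ X).getD t "" = v := by
  have hsplit : List.replicate a v =
      List.replicate (t - s) v ++ v :: List.replicate (a - (t - s) - 1) v := by
    rw [show (v :: List.replicate (a - (t - s) - 1) v) = List.replicate (a - (t - s) - 1 + 1) v
      from (List.replicate_succ).symm, ← List.replicate_add]
    congr 1; omega
  rw [hsplit, show p ++ (List.replicate (t - s) v ++ v :: List.replicate (a - (t - s) - 1) v) ++ X =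
      (p ++ List.replicate (t - s) v) ++ v :: (List.replicate (a - (t - s) - 1) v ++ X) by
    simp [List.append_assoc]]
  exact getD_append_len _ _ _ _ t (by simp [hp]; omega)

-- first '.' at index ≥ k (fallback r.length - 1), the value A's find computes scanning up
def fdW (r : List String) (k : Nat) : Nat :=
  if _h : k + 1 < r.length then (if r.getD k "" = "." then k else fdW r (k + 1)) else k
termination_by r.length - k

-- last '.' at index ≤ k (fallback 0), the value A's find computes scanning down
def fdE (r : List String) : Nat → Nat
  | 0 => 0
  | k + 1 => if r.getD (k + 1) "" = "." then k + 1 else fdE r k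

lemma fdW_bounds (r : List String) (k : Nat) (hk : k < r.length) :
    k ≤ fdW r k ∧ fdW r k < r.length := by
  suffices H : ∀ (m k : Nat), r.length - k ≤ m → k < r.length → k ≤ fdW r k ∧ fdW r k < r.length from
    H (r.length - k) k le_rfl hk
  intro m
  induction m with
  | zero => intro k h1 h2; exact absurd h2 (by omega)
  | succ m ih =>
    intro k h1 h2
    rw [fdW]
    split
    · split
      · exact ⟨le_rfl, h2⟩
      · next h3 _ =>
        have := ih (k + 1) (by omega) (by omega)
        exact ⟨by omega, this.2⟩
    · exact ⟨le_rfl, h2⟩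

lemma fdW_dot (r : List String) (k : Nat) (h : r.getD k "" = ".") : fdW r k = k := by
  rw [fdW]; split <;> simp_all

lemma fdW_skip (r : List String) (k : Nat) (h : r.getD k "" ≠ ".") (h2 : k + 1 < r.length) :
    fdW r k = fdW r (k + 1) := by
  rw [fdW, dif_pos h2, if_neg h]

lemma fdW_skip_many (r : List String) (k : Nat) :
    ∀ (a : Nat), (∀ t, k ≤ t → t < k + a → r.getD t "" ≠ ".") → k + a + 1 ≤ r.length →
      fdW r k = fdW r (k + a) := by
  intro a
  induction a generalizing k with
  | zero => intro _ _; rfl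
  | succ a ih =>
    intro hnd hle
    rw [fdW_skip r k (hnd k le_rfl (by omega)) (by omega)]
    have := ih (k + 1) (fun t ht ht2 => hnd t (by omega) (by omega)) (by omega)
    rw [this]; congr 1; omega

lemma fdW_nondot_below (r : List String) (k : Nat) (hk : k < r.length) :
    ∀ t, k ≤ t → t < fdW r k → r.getD t "" ≠ "." := by
  suffices H : ∀ (m k : Nat), r.length - k ≤ m → k < r.length →
      ∀ t, k ≤ t → t < fdW r k → r.getD t "" ≠ "." from H (r.length - k) k le_rfl hk
  intro m
  induction m with
  | zero => intro k h1 h2; exact absurd h2 (by omega)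
  | succ m ih =>
    intro k h1 h2 t ht1 ht2
    rw [fdW] at ht2
    split at ht2
    · split at ht2
      · exact absurd ht2 (by omega)
      · next h3 hd =>
        rcases Nat.eq_or_lt_of_le ht1 with rfl | hlt
        · exact hd
        · exact ih (k + 1) (by omega) (by omega) t (by omega) ht2
    · exact absurd ht2 (by omega)

lemma fdW_spec (r : List String) (k : Nat) (hk : k < r.length) :
    r.getD (fdW r k) "" = "." ∨
      (fdW r k = r.length - 1 ∧ ∀ t, k ≤ t → t < r.length → r.getD t "" ≠ ".") := by
  suffices H : ∀ (m k : Nat), r.length - k ≤ m → k < r.length →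
      r.getD (fdW r k) "" = "." ∨
        (fdW r k = r.length - 1 ∧ ∀ t, k ≤ t → t < r.length → r.getD t "" ≠ ".") from
    H (r.length - k) k le_rfl hk
  intro m
  induction m with
  | zero => intro k h1 h2; exact absurd h2 (by omega)
  | succ m ih =>
    intro k h1 h2
    by_cases h3 : k + 1 < r.length
    · by_cases hd : r.getD k "" = "."
      · left; rw [fdW_dot r k hd]; exact hd
      · rw [fdW_skip r k hd h3]
        rcases ih (k + 1) (by omega) h3 with hl | ⟨he, hnd⟩
        · left; exact hl
        · right
          refine ⟨he, fun t ht1 ht2 => ?_⟩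
          rcases Nat.eq_or_lt_of_le ht1 with rfl | hlt
          · exact hd
          · exact hnd t (by omega) ht2
    · rw [fdW, dif_neg h3]
      by_cases hd : r.getD k "" = "."
      · left; exact hd
      · right
        refine ⟨by omega, fun t ht1 ht2 => ?_⟩
        have : t = k := by omega
        subst this; exact hd

lemma fdE_le (r : List String) (k : Nat) : fdE r k ≤ k := by
  induction k with
  | zero => simp [fdE]
  | succ k ih =>
    rw [fdE]; split <;> omega

lemma fdE_dot (r : List String) (k : Nat) (h : r.getD k "" = ".") : fdE r k = k := by
  cases k with
  | zero => rfl
  | succ k => rw [fdE, if_pos h]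

lemma fdE_skip (r : List String) (k : Nat) (h : r.getD (k + 1) "" ≠ ".") :
    fdE r (k + 1) = fdE r k := by
  rw [fdE, if_neg h]

lemma fdE_skip_many (r : List String) (k : Nat) :
    ∀ (a : Nat), (∀ t, k < t → t ≤ k + a → r.getD t "" ≠ ".") →
      fdE r (k + a) = fdE r k := by
  intro a
  induction a generalizing k with
  | zero => intro _; rfl
  | succ a ih =>
    intro hnd
    have h1 : k + (a + 1) = (k + a) + 1 := by omega
    rw [h1, fdE_skip r (k + a) (hnd _ (by omega) (by omega))]
    exact ih k (fun t ht ht2 => hnd t ht (by omega))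

lemma fdE_nondot_above (r : List String) (k : Nat) :
    ∀ t, fdE r k < t → t ≤ k → r.getD t "" ≠ "." := by
  induction k with
  | zero => intro t h1 h2; exact absurd h2 (by simp only [fdE] at h1; omega)
  | succ k ih =>
    intro t h1 h2
    rw [fdE] at h1
    split at h1
    · exact absurd h2 (by omega)
    · next hd =>
      rcases Nat.eq_or_lt_of_le h2 with rfl | hlt
      · exact hd
      · exact ih t h1 (by omega)

lemma fdE_spec (r : List String) (k : Nat) :
    r.getD (fdE r k) "" = "." ∨ (fdE r k = 0 ∧ ∀ t, t ≤ k → r.getD t "" ≠ ".") := by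
  induction k with
  | zero =>
    by_cases hd : r.getD 0 "" = "."
    · left; exact hd
    · right
      refine ⟨rfl, fun t ht => ?_⟩
      have : t = 0 := by omega
      subst this; exact hd
  | succ k ih =>
    by_cases hd : r.getD (k + 1) "" = "."
    · left; rw [fdE_dot r (k + 1) hd]; exact hd
    · rw [fdE_skip r k hd]
      rcases ih with hl | ⟨he, hnd⟩
      · left; exact hl
      · right
        refine ⟨he, fun t ht => ?_⟩
        rcases Nat.eq_or_lt_of_le ht with rfl | hlt
        · exact hd
        · exact hnd t (by omega)

lemma rowFind_eq_fdW (r : List String) :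
    ∀ (k : Nat), k < r.length →
      rowFind r (k : Int) (PySem.List.pyRange ((k : Int) + 1) (r.length : Int) 1) = (fdW r k : Int) := by
  suffices H : ∀ (m k : Nat), r.length - k ≤ m → k < r.length →
      rowFind r (k : Int) (PySem.List.pyRange ((k : Int) + 1) (r.length : Int) 1) = (fdW r k : Int) from
    fun k hk => H (r.length - k) k le_rfl hk
  intro m
  induction m with
  | zero => intro k h1 h2; exact absurd h2 (by omega)
  | succ m ih =>
    intro k h1 h2
    by_cases h3 : k + 1 < r.length
    · rw [PySem.List.pyRange_one_cons (by exact_mod_cast h3)]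
      simp only [rowFind, PySem.List.pyGetD_natCast, List.getD_eq_getElem?_getD]
      by_cases hd : r.getD k "" = "."
      · rw [if_neg (by simp_all [List.getD_eq_getElem?_getD]), fdW_dot r k hd]
      · rw [if_pos (by simp_all [List.getD_eq_getElem?_getD])]
        have hc : ((k : Int) + 1) = ((k + 1 : Nat) : Int) := by push_cast; ring
        rw [hc]
        have := ih (k + 1) (by omega) h3
        rw [show ((k + 1 : Nat) : Int) + 1 = ((k + 1 : Nat) : Int) + 1 from rfl, this,
          fdW_skip r k hd h3]
    · have hnil : PySem.List.pyRange ((k : Int) + 1) (r.length : Int) 1 = [] :=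
        PySem.List.pyRange_one_eq_nil (by exact_mod_cast (by omega : r.length ≤ k + 1))
      rw [hnil]
      show (k : Int) = (fdW r k : Int)
      rw [fdW, dif_neg h3]


lemma rowFind_eq_fdE (r : List String) :
    ∀ (k : Nat), k < r.length →
      rowFind r (k : Int) (PySem.List.pyRange ((k : Int) - 1) (-1) (-1)) = (fdE r k : Int) := by
  intro k
  induction k with
  | zero =>
    intro _
    rw [show ((0 : Nat) : Int) - 1 = -1 by norm_num,
      PySem.List.pyRange_neg_one_eq_nil (by norm_num)]
    rfl
  | succ k ih =>
    intro h
    have hc : ((k + 1 : Nat) : Int) - 1 = (k : Int) := by push_cast; ring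
    rw [hc, PySem.List.pyRange_neg_one_cons (by exact_mod_cast (by omega : (-1 : Int) < (k : Int)))]
    simp only [rowFind, PySem.List.pyGetD_natCast]
    by_cases hd : r.getD (k + 1) "" = "."
    · rw [if_neg (by simp_all [List.getD_eq_getElem?_getD]), fdE_dot r (k + 1) hd]
    · rw [if_pos (by simp_all [List.getD_eq_getElem?_getD]), ih (by omega), fdE_skip r k hd]


-- unfolding steps of B's loop
lemma rollGoB_hash (rest : List String) (o seglen : Nat) (out : List String) :
    rollGoB ("#" :: rest) o seglen out =
      rollGoB rest 0 0 (out ++ List.replicate o "O" ++ List.replicate (seglen - o) "." ++ ["#"]) := by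
  simp [rollGoB]

lemma rollGoB_O (rest : List String) (o seglen : Nat) (out : List String) :
    rollGoB ("O" :: rest) o seglen out = rollGoB rest (o + 1) (seglen + 1) out := by
  simp [rollGoB]

lemma rollGoB_dot (rest : List String) (o seglen : Nat) (out : List String) :
    rollGoB ("." :: rest) o seglen out = rollGoB rest o (seglen + 1) out := by
  simp [rollGoB]

-- ===== the per-row equivalence, west =====
theorem westGo (r : List String) (hv : ∀ x ∈ r, OkCell x) :
    ∀ (m j s a b : Nat) (p c : List String) (fr : Int),
      r.length - j ≤ m → j = s + a + b → j ≤ r.length → p.length = s →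
      c = p ++ List.replicate a "O" ++ List.replicate b "." ++ r.drop j →
      (j < r.length → fr = (fdW c s : Int)) →
      rowLoopW (r.length : Int) c fr (PySem.List.pyRange (j : Int) (r.length : Int) 1) =
        rollGoB (r.drop j) a (a + b) p := by
  intro m
  induction m with
  | zero =>
    intro j s a b p c fr h1 h2 h3 hp hc hfr
    have hj : j = r.length := by omega
    subst hj
    rw [PySem.List.pyRange_one_eq_nil le_rfl]
    show c = rollGoB (r.drop r.length) a (a + b) p
    rw [hc]
    simp [List.drop_length, rollGoB, Nat.add_sub_cancel_left]
  | succ m ih =>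
    intro j s a b p c fr h1 h2 h3 hp hc hfr
    rcases Nat.eq_or_lt_of_le h3 with hj | hjlt
    · subst hj
      rw [PySem.List.pyRange_one_eq_nil le_rfl]
      show c = rollGoB (r.drop r.length) a (a + b) p
      rw [hc]
      simp [List.drop_length, rollGoB, Nat.add_sub_cancel_left]
    · have hcons : PySem.List.pyRange (j : Int) (r.length : Int) 1 =
          (j : Int) :: PySem.List.pyRange ((j : Int) + 1) (r.length : Int) 1 :=
        PySem.List.pyRange_one_cons (by exact_mod_cast hjlt)
      rw [hcons]
      have hfr' := hfr hjlt
      have hlenc : c.length = r.length := by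
        rw [hc]; simp [List.length_drop, hp]; omega
      have hdropj : r.drop j = r[j] :: r.drop (j + 1) := List.drop_eq_getElem_cons hjlt
      have hprelen : (p ++ List.replicate a "O" ++ List.replicate b ".").length = j := by
        simp [hp]; omega
      have hcj : c.getD j "" = r[j] := by
        rw [hc, hdropj]
        exact getD_append_len _ _ _ _ j hprelen
      have hcjD : PySem.List.pyGetD c (j : Int) "" = r[j] := by
        rw [PySem.List.pyGetD_natCast]; exact hcj
      have hsle : s < c.length := by rw [hlenc]; omega
      have hfne : fr ≠ ((r.length : Nat) : Int) := by
        rw [hfr']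
        have hlt := (fdW_bounds c s hsle).2
        rw [hlenc] at hlt
        exact_mod_cast hlt.ne
      simp only [rowLoopW]
      rw [if_neg hfne]
      rcases hv r[j] (List.getElem_mem hjlt) with hdot | hhash | hO
      · -- '.' cell: nothing happens
        rw [if_neg (by rw [hcjD, hdot]; simp), if_neg (by rw [hcjD, hdot]; simp)]
        have hc' : c = p ++ List.replicate a "O" ++ List.replicate (b + 1) "." ++ r.drop (j + 1) := by
          rw [hc, hdropj, hdot, List.replicate_succ']
          simp [List.append_assoc]
        rw [show (j : Int) + 1 = ((j + 1 : Nat) : Int) by push_cast; ring]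
        rw [ih (j + 1) s a (b + 1) p c fr (by omega) (by omega) (by omega) hp hc' (fun _ => hfr')]
        rw [hdropj, hdot, rollGoB_dot, show a + (b + 1) = a + b + 1 by omega]
      · -- '#' cell: the free spot is recomputed past j
        rw [if_neg (by rw [hcjD, hhash]; simp), if_pos (by rw [hcjD, hhash])]
        have hc' : c = (p ++ List.replicate a "O" ++ List.replicate b "." ++ ["#"]) ++
            List.replicate 0 "O" ++ List.replicate 0 "." ++ r.drop (j + 1) := by
          rw [hc, hdropj, hhash]; simp [List.append_assoc]
        have hp' : (p ++ List.replicate a "O" ++ List.replicate b "." ++ ["#"]).length = j + 1 := by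
          simp [hp]; omega
        rw [show (j : Int) + 1 = ((j + 1 : Nat) : Int) by push_cast; ring]
        have key := ih (j + 1) (j + 1) 0 0 (p ++ List.replicate a "O" ++ List.replicate b "." ++ ["#"]) c
          (rowFind c ((j + 1 : Nat) : Int)
            (PySem.List.pyRange (((j + 1 : Nat) : Int) + 1) ((r.length : Nat) : Int) 1))
          (by omega) (by omega) (by omega) hp' hc'
          (fun hlt => by
            rw [show ((r.length : Nat) : Int) = ((c.length : Nat) : Int) by rw [hlenc]]
            exact rowFind_eq_fdW c (j + 1) (by rw [hlenc]; exact hlt))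
        rw [key, hdropj, hhash, rollGoB_hash, Nat.add_sub_cancel_left]
      · -- 'O' cell
        have hznd : ∀ t, s ≤ t → t < s + a → c.getD t "" ≠ "." := by
          intro t ht1 ht2
          rw [hc, show p ++ List.replicate a "O" ++ List.replicate b "." ++ r.drop j =
              p ++ List.replicate a "O" ++ (List.replicate b "." ++ r.drop j) by
            simp [List.append_assoc]]
          rw [getD_replicate_zone p _ "O" a s t hp ht1 ht2]
          simp
        by_cases hb : 0 < b
        · -- a dot is available before j: the rock moves
          have hcdot : c = (p ++ List.replicate a "O") ++ "." ::
              (List.replicate (b - 1) "." ++ r.drop j) := by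
            rw [hc, show List.replicate b "." = "." :: List.replicate (b - 1) "." by
              rw [← List.replicate_succ]; congr 1; omega]
            simp [List.append_assoc]
          have hpa : (p ++ List.replicate a "O").length = s + a := by simp [hp]
          have hcdots : c.getD (s + a) "" = "." := by
            rw [hcdot]; exact getD_append_len _ _ _ _ _ hpa
          have hfde : fdW c s = s + a := by
            rw [fdW_skip_many c s a hznd (by rw [hlenc]; omega), fdW_dot c (s + a) hcdots]
          have hfr2 : fr = ((s + a : Nat) : Int) := by rw [hfr', hfde]
          rw [if_pos ⟨by rw [hcjD, hO], by rw [hfr2]; exact_mod_cast (by omega : s + a < j)⟩]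
          have hset1 : PySem.List.pySetD c fr "O" =
              p ++ List.replicate (a + 1) "O" ++ List.replicate (b - 1) "." ++ r.drop j := by
            rw [hfr2, PySem.List.pySetD_natCast, hcdot, set_append_len _ _ _ _ _ hpa]
            simp [List.replicate_succ', List.append_assoc]
          rw [hset1]
          have hset2 : PySem.List.pySetD
              (p ++ List.replicate (a + 1) "O" ++ List.replicate (b - 1) "." ++ r.drop j) (j : Int) "." =
              p ++ List.replicate (a + 1) "O" ++ List.replicate b "." ++ r.drop (j + 1) := by
            rw [PySem.List.pySetD_natCast, hdropj,
              show p ++ List.replicate (a + 1) "O" ++ List.replicate (b - 1) "." ++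
                  (r[j] :: r.drop (j + 1)) =
                ((p ++ List.replicate (a + 1) "O") ++ List.replicate (b - 1) ".") ++
                  r[j] :: r.drop (j + 1) by simp [List.append_assoc]]
            rw [set_append_len _ _ _ _ j (by simp [hp]; omega)]
            rw [show List.replicate b "." = List.replicate (b - 1) "." ++ ["."] by
              rw [← List.replicate_succ']; congr 1; omega]
            simp [List.append_assoc]
          rw [hset2]
          have hlenc2 : (p ++ List.replicate (a + 1) "O" ++ List.replicate b "." ++
              r.drop (j + 1)).length = r.length := by
            simp [hp]; omega
          have hznd2 : ∀ t, s ≤ t → t < s + (a + 1) →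
              (p ++ List.replicate (a + 1) "O" ++ List.replicate b "." ++
                r.drop (j + 1)).getD t "" ≠ "." := by
            intro t ht1 ht2
            rw [show p ++ List.replicate (a + 1) "O" ++ List.replicate b "." ++ r.drop (j + 1) =
                p ++ List.replicate (a + 1) "O" ++ (List.replicate b "." ++ r.drop (j + 1)) by
              simp [List.append_assoc]]
            rw [getD_replicate_zone p _ "O" (a + 1) s t hp ht1 ht2]
            simp
          rw [hfr2, show ((s + a : Nat) : Int) + 1 = ((s + a + 1 : Nat) : Int) by push_cast; ring,
            show (j : Int) + 1 = ((j + 1 : Nat) : Int) by push_cast; ring]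
          have key := ih (j + 1) s (a + 1) b p
            (p ++ List.replicate (a + 1) "O" ++ List.replicate b "." ++ r.drop (j + 1))
            (rowFind (p ++ List.replicate (a + 1) "O" ++ List.replicate b "." ++ r.drop (j + 1))
              ((s + a + 1 : Nat) : Int)
              (PySem.List.pyRange (((s + a + 1 : Nat) : Int) + 1) ((r.length : Nat) : Int) 1))
            (by omega) (by omega) (by omega) hp rfl
            (fun _ => by
              rw [show ((r.length : Nat) : Int) =
                  (((p ++ List.replicate (a + 1) "O" ++ List.replicate b "." ++
                    r.drop (j + 1)).length : Nat) : Int) by rw [hlenc2]]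
              rw [rowFind_eq_fdW _ (s + a + 1) (by rw [hlenc2]; omega)]
              have hskip := fdW_skip_many
                (p ++ List.replicate (a + 1) "O" ++ List.replicate b "." ++ r.drop (j + 1))
                s (a + 1) hznd2 (by rw [hlenc2]; omega)
              rw [show s + (a + 1) = s + a + 1 by omega] at hskip
              rw [← hskip])
          rw [key, hdropj, hO, rollGoB_O,
            show a + 1 + b = a + b + 1 by omega]
        · -- no dot before j in the open segment: the rock stays
          have hb0 : b = 0 := by omega
          subst hb0
          have hge : j ≤ fdW c s := by
            have h1 := fdW_skip_many c s a hznd (by rw [hlenc]; omega)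
            have h2 := (fdW_bounds c (s + a) (by rw [hlenc]; omega)).1
            omega
          have hne : ¬(PySem.List.pyGetD c (j : Int) "" = "O" ∧ fr < (j : Int)) := by
            rintro ⟨-, hlt⟩
            rw [hfr'] at hlt
            have : fdW c s < j := by exact_mod_cast hlt
            omega
          rw [if_neg hne, if_neg (by rw [hcjD, hO]; simp)]
          have hc' : c = p ++ List.replicate (a + 1) "O" ++ List.replicate 0 "." ++ r.drop (j + 1) := by
            rw [hc, hdropj, hO]
            simp [List.replicate_succ', List.append_assoc]
          rw [show (j : Int) + 1 = ((j + 1 : Nat) : Int) by push_cast; ring]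
          rw [ih (j + 1) s (a + 1) 0 p c fr (by omega) (by omega) (by omega) hp hc' (fun _ => hfr')]
          try rw [hdropj, hO, rollGoB_O]
          try norm_num

theorem westInit (r : List String) (hv : ∀ x ∈ r, OkCell x) :
    ∀ (k : Nat), k ≤ r.length → (∀ t, t < k → r.getD t "" ≠ ".") →
      ∃ s a, s + a = k ∧ r.take k = r.take s ++ List.replicate a "O" ∧
        rollGoB r 0 0 [] = rollGoB (r.drop k) a a (r.take s) := by
  intro k
  induction k with
  | zero => intro _ _; exact ⟨0, 0, rfl, by simp, by simp⟩
  | succ k ih =>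
    intro hk hnd
    obtain ⟨s, a, hsa, htake, hroll⟩ := ih (by omega) (fun t ht => hnd t (by omega))
    have hklt : k < r.length := by omega
    have hdrop : r.drop k = r[k] :: r.drop (k + 1) := List.drop_eq_getElem_cons hklt
    have htk : r.take (k + 1) = r.take k ++ [r[k]] := by
      rw [List.take_add_one, List.getElem?_eq_getElem hklt]; rfl
    have hndk : r.getD k "" ≠ "." := hnd k (by omega)
    have hgd : r.getD k "" = r[k] := by
      simp [List.getD_eq_getElem?_getD, List.getElem?_eq_getElem hklt]
    rcases hv r[k] (List.getElem_mem hklt) with hdot | hhash | hO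
    · exact absurd (hgd.trans hdot) hndk
    · refine ⟨k + 1, 0, by omega, by simp, ?_⟩
      rw [hroll, hdrop, hhash, rollGoB_hash, Nat.sub_self, List.replicate_zero]
      congr 1
      rw [htk, htake]
      simp [hhash]
    · refine ⟨s, a + 1, by omega, ?_, ?_⟩
      · rw [htk, htake, hO]
        simp [List.replicate_succ', List.append_assoc]
      · rw [hroll, hdrop, hO, rollGoB_O]

theorem rowWest (r : List String) (hv : ∀ x ∈ r, OkCell x) :
    rowWestA (r.length : Int) r = rollWest r := by
  unfold rowWestA rollWest
  rcases Nat.eq_zero_or_pos r.length with hn | hn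
  · have hr : r = [] := List.eq_nil_of_length_eq_zero hn
    subst hr
    simp only [List.length_nil, Nat.cast_zero]
    rw [PySem.List.pyRange_one_eq_nil (by norm_num)]
    show rowLoopW 0 [] (rowFind [] 0 []) (PySem.List.pyRange (rowFind [] 0 [] + 1) 0 1) = _
    rw [show rowFind ([] : List String) 0 [] = 0 from rfl,
      PySem.List.pyRange_one_eq_nil (by norm_num)]
    rfl
  · have hbr : rowFind r 0 (PySem.List.pyRange 1 (r.length : Int) 1) = ((fdW r 0 : Nat) : Int) := by
      have h := rowFind_eq_fdW r 0 hn
      norm_num at h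
      exact h
    rw [hbr]
    have hfb := fdW_bounds r 0 hn
    rcases fdW_spec r 0 hn with hdot | ⟨hlast, hall⟩
    · have hflt : fdW r 0 < r.length := hfb.2
      obtain ⟨s, a, hsa, htake, hroll⟩ := westInit r hv (fdW r 0) (by omega)
        (fun t ht => fdW_nondot_below r 0 hn t (by omega) ht)
      have hps : (r.take s).length = s := by simp; omega
      have hrfj : r[fdW r 0] = "." := by
        rw [List.getD_eq_getElem?_getD, List.getElem?_eq_getElem hflt] at hdot
        simpa using hdot
      have hshape : r = r.take s ++ List.replicate a "O" ++ List.replicate 1 "." ++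
          r.drop (fdW r 0 + 1) := by
        conv_lhs => rw [← List.take_append_drop (fdW r 0 + 1) r]
        rw [show r.take (fdW r 0 + 1) = r.take (fdW r 0) ++ [r[fdW r 0]] from by
          rw [List.take_add_one, List.getElem?_eq_getElem hflt]; rfl]
        rw [htake, hrfj]
        simp [List.append_assoc]
      have hfs : fdW r s = fdW r 0 := by
        have h2 := fdW_skip_many r 0 s
          (fun t ht1 ht2 => fdW_nondot_below r 0 hn t (by omega) (by omega)) (by omega)
        simpa using h2.symm
      have hmain := westGo r hv r.length (fdW r 0 + 1) s a 1 (r.take s) r ((fdW r 0 : Nat) : Int)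
        (by omega) (by omega) (by omega) hps hshape (fun _ => by rw [hfs])
      rw [show ((fdW r 0 : Nat) : Int) + 1 = ((fdW r 0 + 1 : Nat) : Int) by push_cast; ring]
      rw [hmain, hroll,
        show r.drop (fdW r 0) = "." :: r.drop (fdW r 0 + 1) from by
          rw [List.drop_eq_getElem_cons hflt, hrfj],
        rollGoB_dot]
    · obtain ⟨s, a, hsa, htake, hroll⟩ := westInit r hv r.length le_rfl
        (fun t ht => hall t (by omega) ht)
      rw [PySem.List.pyRange_one_eq_nil (by push_cast; omega)]
      show r = rollGoB r 0 0 []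
      rw [hroll, List.drop_length]
      show r = r.take s ++ List.replicate a "O" ++ List.replicate (a - a) "."
      rw [Nat.sub_self, List.replicate_zero, List.append_nil, ← htake, List.take_length]

-- ===== the per-row equivalence, east =====
theorem eastGo (r : List String) (hv : ∀ x ∈ r, OkCell x) :
    ∀ (t a b : Nat) (q c : List String) (fr : Int),
      t + b + a + q.length = r.length →
      c = r.take t ++ List.replicate b "." ++ List.replicate a "O" ++ q →
      (0 < t → fr = (fdE c (t + a + b - 1) : Int)) →
      rowLoopE (r.length : Int) c fr (PySem.List.pyRange ((t : Int) - 1) (-1) (-1)) =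
        (rollGoB (r.take t).reverse a (a + b) q.reverse).reverse := by
  intro t
  induction t with
  | zero =>
    intro a b q c fr hsum hc hfr
    rw [show ((0 : Nat) : Int) - 1 = -1 by norm_num,
      PySem.List.pyRange_neg_one_eq_nil (by norm_num)]
    show c = _
    rw [hc]
    simp [rollGoB, Nat.add_sub_cancel_left, List.reverse_append]
  | succ t ih =>
    intro a b q c fr hsum hc hfr
    have htlt : t < r.length := by omega
    rw [show (((t + 1 : Nat)) : Int) - 1 = ((t : Nat) : Int) by push_cast; ring,
      PySem.List.pyRange_neg_one_cons (by omega)]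
    have htk : r.take (t + 1) = r.take t ++ [r[t]] := by
      rw [List.take_add_one, List.getElem?_eq_getElem htlt]; rfl
    have hlenc : c.length = r.length := by
      rw [hc]; simp; omega
    have hct : c.getD t "" = r[t] := by
      rw [hc, htk, show (r.take t ++ [r[t]]) ++ List.replicate b "." ++ List.replicate a "O" ++ q =
          r.take t ++ r[t] :: (List.replicate b "." ++ List.replicate a "O" ++ q) by
        simp only [List.append_assoc, List.cons_append, List.singleton_append, List.nil_append]]
      exact getD_append_len _ _ _ _ t (by simp; omega)
    have hctD : PySem.List.pyGetD c ((t : Nat) : Int) "" = r[t] := by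
      rw [PySem.List.pyGetD_natCast]; exact hct
    have hfr' := hfr (by omega)
    rw [show (t + 1) + a + b - 1 = t + a + b by omega] at hfr'
    have hfne : fr ≠ ((r.length : Nat) : Int) := by
      rw [hfr']
      have h1 : fdE c (t + a + b) ≤ t + a + b := fdE_le c _
      have h2 : fdE c (t + a + b) < r.length := by omega
      exact_mod_cast h2.ne
    simp only [rowLoopE]
    rw [if_neg hfne]
    have hX : c = (r.take (t + 1) ++ List.replicate b ".") ++ List.replicate a "O" ++ q := by
      rw [hc]
    have hXlen : (r.take (t + 1) ++ List.replicate b ".").length = t + 1 + b := by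
      simp; omega
    have hznd : ∀ u, t + 1 + b ≤ u → u < t + 1 + b + a → c.getD u "" ≠ "." := by
      intro u h1 h2
      rw [hX, getD_replicate_zone _ _ "O" a (t + 1 + b) u hXlen h1 h2]
      simp
    rcases hv r[t] (List.getElem_mem htlt) with hdot | hhash | hO
    · -- '.'
      rw [if_neg (by rw [hctD, hdot]; simp), if_neg (by rw [hctD, hdot]; simp)]
      have hc' : c = r.take t ++ List.replicate (b + 1) "." ++ List.replicate a "O" ++ q := by
        rw [hc, htk, hdot]
        simp [List.replicate_succ, List.append_assoc]
      rw [ih a (b + 1) q c fr (by omega) hc'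
        (fun _ => by rw [show t + a + (b + 1) - 1 = t + a + b by omega]; exact hfr')]
      rw [htk, hdot, show ((r.take t ++ ["."]).reverse) = "." :: (r.take t).reverse by simp,
        rollGoB_dot, show a + (b + 1) = a + b + 1 by omega]
    · -- '#'
      rw [if_neg (by rw [hctD, hhash]; simp), if_pos (by rw [hctD, hhash])]
      have hc' : c = r.take t ++ List.replicate 0 "." ++ List.replicate 0 "O" ++
          ("#" :: (List.replicate b "." ++ List.replicate a "O" ++ q)) := by
        rw [hc, htk, hhash]; simp [List.append_assoc]
      have key := ih 0 0 ("#" :: (List.replicate b "." ++ List.replicate a "O" ++ q)) c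
        (rowFind c (((t : Nat) : Int) - 1)
          (PySem.List.pyRange ((((t : Nat) : Int) - 1) - 1) (-1) (-1)))
        (by simp; omega) hc'
        (fun ht => by
          rw [show ((t : Nat) : Int) - 1 = ((t - 1 : Nat) : Int) by omega,
            rowFind_eq_fdE c (t - 1) (by rw [hlenc]; omega)]
          norm_num)
      rw [key]
      rw [htk, hhash, show ((r.take t ++ ["#"]).reverse) = "#" :: (r.take t).reverse by simp,
        rollGoB_hash, Nat.add_sub_cancel_left,
        show ("#" :: (List.replicate b "." ++ List.replicate a "O" ++ q)).reverse =
          q.reverse ++ List.replicate a "O" ++ List.replicate b "." ++ ["#"] by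
          simp [List.append_assoc]]
      try norm_num
    · -- 'O'
      by_cases hb : 0 < b
      · have hdotc : c.getD (t + b) "" = "." := by
          rw [hc, show List.replicate b "." = List.replicate (b - 1) "." ++ ["."] by
              rw [← List.replicate_succ']; congr 1; omega,
            show r.take (t + 1) ++ (List.replicate (b - 1) "." ++ ["."]) ++
                List.replicate a "O" ++ q =
              (r.take (t + 1) ++ List.replicate (b - 1) ".") ++ "." ::
                (List.replicate a "O" ++ q) by simp [List.append_assoc]]
          exact getD_append_len _ _ _ _ _ (by simp; omega)
        have hfde : fdE c (t + a + b) = t + b := by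
          have hs := fdE_skip_many c (t + b) a
            (fun u hu1 hu2 => hznd u (by omega) (by omega))
          calc fdE c (t + a + b) = fdE c ((t + b) + a) := by congr 1; omega
            _ = fdE c (t + b) := hs
            _ = t + b := fdE_dot c (t + b) hdotc
        have hfr2 : fr = ((t + b : Nat) : Int) := by rw [hfr', hfde]
        rw [if_pos ⟨by rw [hctD, hO], by rw [hfr2]; omega⟩]
        have hset1 : PySem.List.pySetD c fr "O" =
            r.take (t + 1) ++ List.replicate (b - 1) "." ++ List.replicate (a + 1) "O" ++ q := by
          rw [hfr2, PySem.List.pySetD_natCast, hc,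
            show List.replicate b "." = List.replicate (b - 1) "." ++ ["."] by
              rw [← List.replicate_succ']; congr 1; omega,
            show r.take (t + 1) ++ (List.replicate (b - 1) "." ++ ["."]) ++
                List.replicate a "O" ++ q =
              (r.take (t + 1) ++ List.replicate (b - 1) ".") ++ "." ::
                (List.replicate a "O" ++ q) by simp [List.append_assoc],
            set_append_len _ _ _ _ (t + b) (by simp; omega)]
          simp [List.replicate_succ, List.append_assoc]
        rw [hset1]
        have hset2 : PySem.List.pySetD
            (r.take (t + 1) ++ List.replicate (b - 1) "." ++ List.replicate (a + 1) "O" ++ q)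
            ((t : Nat) : Int) "." =
            r.take t ++ List.replicate b "." ++ List.replicate (a + 1) "O" ++ q := by
          rw [PySem.List.pySetD_natCast, htk,
            show (r.take t ++ [r[t]]) ++ List.replicate (b - 1) "." ++
                List.replicate (a + 1) "O" ++ q =
              r.take t ++ r[t] :: (List.replicate (b - 1) "." ++
                List.replicate (a + 1) "O" ++ q) by
              simp only [List.append_assoc, List.cons_append, List.singleton_append, List.nil_append],
            set_append_len _ _ _ _ t (by simp; omega),
            show List.replicate b "." = "." :: List.replicate (b - 1) "." by
              rw [← List.replicate_succ]; congr 1; omega]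
          simp [List.append_assoc]
        rw [hset2]
        rw [hfr2, show ((t + b : Nat) : Int) - 1 = ((t + b - 1 : Nat) : Int) by omega]
        have key := ih (a + 1) b q
          (r.take t ++ List.replicate b "." ++ List.replicate (a + 1) "O" ++ q)
          (rowFind (r.take t ++ List.replicate b "." ++ List.replicate (a + 1) "O" ++ q)
            ((t + b - 1 : Nat) : Int)
            (PySem.List.pyRange (((t + b - 1 : Nat) : Int) - 1) (-1) (-1)))
          (by omega) rfl
          (fun _ => by
            rw [rowFind_eq_fdE _ (t + b - 1) (by simp; omega)]
            congr 1
            have hpb : ((r.take t ++ List.replicate b ".").length) = t + b := by simp; omega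
            have hzn2 : ∀ u, t + b - 1 < u → u ≤ (t + b - 1) + (a + 1) →
                (r.take t ++ List.replicate b "." ++ List.replicate (a + 1) "O" ++ q).getD u "" ≠ "." := by
              intro u hu1 hu2
              rw [show r.take t ++ List.replicate b "." ++ List.replicate (a + 1) "O" ++ q =
                  (r.take t ++ List.replicate b ".") ++ List.replicate (a + 1) "O" ++ q by
                simp [List.append_assoc]]
              rw [getD_replicate_zone _ _ "O" (a + 1) (t + b) u hpb (by omega) (by omega)]
              simp
            have hs2 := fdE_skip_many
              (r.take t ++ List.replicate b "." ++ List.replicate (a + 1) "O" ++ q)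
              (t + b - 1) (a + 1) hzn2
            rw [show t + (a + 1) + b - 1 = (t + b - 1) + (a + 1) by omega, hs2])
        rw [key]
        rw [htk, hO, show ((r.take t ++ ["O"]).reverse) = "O" :: (r.take t).reverse by simp,
          rollGoB_O, show a + b + 1 = (a + 1) + b by omega]
      · have hb0 : b = 0 := by omega
        subst hb0
        rw [show t + a + 0 = t + a by omega] at hfr'
        have hle : fdE c (t + a) ≤ t := by
          have hs := fdE_skip_many c t a (fun u hu1 hu2 => hznd u (by omega) (by omega))
          have h2 := fdE_le c t
          omega
        have hne : ¬(PySem.List.pyGetD c ((t : Nat) : Int) "" = "O" ∧ ((t : Nat) : Int) < fr) := by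
          rintro ⟨-, hlt⟩
          rw [hfr'] at hlt
          have : (t : Nat) < fdE c (t + a) := by exact_mod_cast hlt
          omega
        rw [if_neg hne, if_neg (by rw [hctD, hO]; simp)]
        have hc' : c = r.take t ++ List.replicate 0 "." ++ List.replicate (a + 1) "O" ++ q := by
          rw [hc, htk, hO]
          simp [List.replicate_succ, List.append_assoc]
        rw [ih (a + 1) 0 q c fr (by omega) hc'
          (fun _ => by rw [show t + (a + 1) + 0 - 1 = t + a by omega]; exact hfr')]
        try rw [htk, hO, show ((r.take t ++ ["O"]).reverse) = "O" :: (r.take t).reverse by simp,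
          rollGoB_O]
        try norm_num

lemma getD_reverse (r : List String) (u : Nat) (hu : u < r.length) :
    r.reverse.getD u "" = r.getD (r.length - 1 - u) "" := by
  rw [List.getD_eq_getElem?_getD, List.getD_eq_getElem?_getD,
    List.getElem?_eq_getElem (by simpa using hu), List.getElem?_eq_getElem (by omega)]
  simp [List.getElem_reverse]

theorem rowEast (r : List String) (hv : ∀ x ∈ r, OkCell x) :
    rowEastA (r.length : Int) r = (rollWest r.reverse).reverse := by
  unfold rowEastA rollWest
  rcases Nat.eq_zero_or_pos r.length with hn | hn
  · have hr : r = [] := List.eq_nil_of_length_eq_zero hn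
    subst hr
    simp only [List.length_nil, Nat.cast_zero]
    rw [show (0 : Int) - 1 - 1 = -2 by norm_num,
      PySem.List.pyRange_neg_one_eq_nil (by norm_num)]
    show rowLoopE 0 [] (rowFind [] (0 - 1) [])
      (PySem.List.pyRange (rowFind [] (0 - 1) [] - 1) (-1) (-1)) = _
    rw [show rowFind ([] : List String) (0 - 1) [] = 0 - 1 from rfl,
      show (0 : Int) - 1 - 1 = -2 by norm_num,
      PySem.List.pyRange_neg_one_eq_nil (by norm_num)]
    rfl
  · have hvrev : ∀ x ∈ r.reverse, OkCell x := fun x hx => hv x (List.mem_reverse.mp hx)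
    rw [show ((r.length : Nat) : Int) - 1 = ((r.length - 1 : Nat) : Int) by omega,
      rowFind_eq_fdE r (r.length - 1) (by omega)]
    rcases fdE_spec r (r.length - 1) with hdot | ⟨h0, hall⟩
    · have hfle : fdE r (r.length - 1) ≤ r.length - 1 := fdE_le r _
      have hflt : fdE r (r.length - 1) < r.length := by omega
      obtain ⟨s, a, hsa, htake, hroll⟩ := westInit r.reverse hvrev
        ((r.length - 1) - fdE r (r.length - 1)) (by simp; omega)
        (fun u hu => by
          rw [getD_reverse r u (by omega)]
          exact fdE_nondot_above r (r.length - 1) (r.length - 1 - u) (by omega) (by omega))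
      have hdk : r.reverse.drop ((r.length - 1) - fdE r (r.length - 1)) =
          (r.take (fdE r (r.length - 1) + 1)).reverse := by
        rw [List.reverse_take]
        congr 1
        omega
      have hrfj : r[fdE r (r.length - 1)] = "." := by
        rw [List.getD_eq_getElem?_getD, List.getElem?_eq_getElem hflt] at hdot
        simpa using hdot
      have htk1 : r.take (fdE r (r.length - 1) + 1) =
          r.take (fdE r (r.length - 1)) ++ [r[fdE r (r.length - 1)]] := by
        rw [List.take_add_one, List.getElem?_eq_getElem hflt]; rfl
      have hshape : r = r.take (fdE r (r.length - 1)) ++ List.replicate 1 "." ++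
          List.replicate a "O" ++ (r.reverse.take s).reverse := by
        conv_lhs => rw [← List.reverse_reverse r]
        conv_lhs =>
          rw [← List.take_append_drop ((r.length - 1) - fdE r (r.length - 1)) r.reverse]
        rw [htake, hdk, htk1, hrfj]
        simp [List.reverse_append, List.append_assoc]
      have hcond : 0 < fdE r (r.length - 1) →
          ((fdE r (r.length - 1) : Nat) : Int) =
            ((fdE r (fdE r (r.length - 1) + a + 1 - 1) : Nat) : Int) := fun _ => by
        congr 1
        rw [show fdE r (r.length - 1) + a + 1 - 1 = fdE r (r.length - 1) + a by omega]
        have hs := fdE_skip_many r (fdE r (r.length - 1)) a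
          (fun u hu1 hu2 => fdE_nondot_above r (r.length - 1) u (by omega) (by omega))
        rw [hs, fdE_dot r _ hdot]
      have hmain := eastGo r hv (fdE r (r.length - 1)) a 1 ((r.reverse.take s).reverse) r
        ((fdE r (r.length - 1) : Nat) : Int) (by simp; omega) hshape hcond
      rw [hmain, List.reverse_reverse]
      congr 1
      rw [hroll, hdk, htk1, hrfj,
        show ((r.take (fdE r (r.length - 1)) ++ ["."]).reverse) =
          "." :: (r.take (fdE r (r.length - 1))).reverse by simp,
        rollGoB_dot]
    · rw [h0]
      rw [show ((0 : Nat) : Int) - 1 = -1 by norm_num,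
        PySem.List.pyRange_neg_one_eq_nil (by norm_num)]
      show r = (rollGoB r.reverse 0 0 []).reverse
      obtain ⟨s, a, hsa, htake, hroll⟩ := westInit r.reverse hvrev r.reverse.length le_rfl
        (fun u hu => by
          rw [getD_reverse r u (by simpa using hu)]
          exact hall (r.length - 1 - u) (by omega))
      rw [hroll, List.drop_length,
        show rollGoB [] a a (r.reverse.take s) =
          r.reverse.take s ++ List.replicate a "O" ++ List.replicate (a - a) "." from rfl,
        Nat.sub_self, List.replicate_zero, List.append_nil, ← htake,
        List.take_length, List.reverse_reverse]

-- ===== assembling the ports =====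
lemma portA_west (lines : List (List String)) (cols : Int) (k : Nat) (hk : k ≤ lines.length) :
    moveHorizontally lines (k : Int) cols [1, 0, cols] = appFirst (rowWestA cols) k lines := by
  unfold moveHorizontally
  refine foldl_pyRange_appFirst _ (rowWestA cols) ?_ k lines hk
  intro ls i hi
  have hg0 : PySem.List.pyGetD ([1, 0, cols] : List Int) 0 0 = 1 := by
    simp [PySem.List.pyGetD]
  have hg1 : PySem.List.pyGetD ([1, 0, cols] : List Int) 1 0 = 0 := by
    simp [PySem.List.pyGetD]
  have hg2 : PySem.List.pyGetD ([1, 0, cols] : List Int) 2 0 = cols := by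
    simp [PySem.List.pyGetD]
  show moveGoA _ _ _ _ _ _ = _
  simp only [findNextFreeSpotH, hg0, hg1, hg2]
  rw [findGoA_eq_rowFind]
  rw [moveGoA_west cols (i : Int) _ ls _ (by positivity) (by exact_mod_cast hi)]
  unfold rowWestA
  norm_num

lemma portA_east (lines : List (List String)) (cols : Int) (k : Nat) (hk : k ≤ lines.length) :
    moveHorizontally lines (k : Int) cols [-1, cols - 1, -1] = appFirst (rowEastA cols) k lines := by
  unfold moveHorizontally
  refine foldl_pyRange_appFirst _ (rowEastA cols) ?_ k lines hk
  intro ls i hi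
  have hg0 : PySem.List.pyGetD ([-1, cols - 1, -1] : List Int) 0 0 = -1 := by
    simp [PySem.List.pyGetD]
  have hg1 : PySem.List.pyGetD ([-1, cols - 1, -1] : List Int) 1 0 = cols - 1 := by
    simp [PySem.List.pyGetD]
  have hg2 : PySem.List.pyGetD ([-1, cols - 1, -1] : List Int) 2 0 = -1 := by
    simp [PySem.List.pyGetD]
  show moveGoA _ _ _ _ _ _ = _
  simp only [findNextFreeSpotH, hg0, hg1, hg2]
  rw [findGoA_eq_rowFind]
  rw [moveGoA_east cols (i : Int) _ ls _ (by positivity) (by exact_mod_cast hi)]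
  unfold rowEastA
  simp [sub_eq_add_neg]

lemma portB_eq (lines : List (List String)) (cols : Int) (dir : List Int) (k : Nat)
    (hk : k ≤ lines.length) :
    moveHorizontally_alt lines (k : Int) cols dir =
      appFirst (fun r => if PySem.List.pyGetD dir 0 0 = 1 then rollWest r
        else (rollWest r.reverse).reverse) k lines := by
  unfold moveHorizontally_alt
  refine foldl_pyRange_appFirst _ _ ?_ k lines hk
  intro ls i _
  by_cases h : PySem.List.pyGetD dir 0 0 = 1 <;> simp [h]

-- ===== VERDICT (by name: the statement is the Claim_ definition above) =====
theorem moveHorizontally_spec : Claim_equal_moveHorizontally := by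
  intro lines rows cols dir _hdom hpre
  unfold Spec_moveHorizontally
  rcases hpre with hneg | ⟨hpos, hlen, hval, hdir⟩
  · have h : PySem.List.pyRange 0 rows 1 = [] := PySem.List.pyRange_one_eq_nil hneg
    simp [moveHorizontally, moveHorizontally_alt, h]
  · have hk : rows = ((rows.toNat : Nat) : Int) := by omega
    have hkl : rows.toNat ≤ lines.length := by omega
    have hrows : ∀ row ∈ lines.take rows.toNat, (row.length : Int) = cols ∧ ∀ x ∈ row, OkCell x :=
      fun row hr => ⟨(hval row hr).1, fun x hx => (hval row hr).2 x hx⟩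
    rcases hdir with hd | hd <;> subst hd <;> rw [hk]
    · rw [portA_west lines cols rows.toNat hkl, portB_eq lines cols _ rows.toNat hkl]
      apply appFirst_congr
      intro row hr
      obtain ⟨hc, hvr⟩ := hrows row hr
      have : rowWestA cols row = rowWestA ((row.length : Nat) : Int) row := by rw [hc]
      rw [this, rowWest row hvr]
      have h1 : PySem.List.pyGetD [(1 : Int), 0, cols] 0 0 = 1 := by
        simp [PySem.List.pyGetD, PySem.List.pyIdx?]
      rw [h1]; simp
    · rw [portA_east lines cols rows.toNat hkl, portB_eq lines cols _ rows.toNat hkl]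
      apply appFirst_congr
      intro row hr
      obtain ⟨hc, hvr⟩ := hrows row hr
      have : rowEastA cols row = rowEastA ((row.length : Nat) : Int) row := by rw [hc]
      rw [this, rowEast row hvr]
      have h1 : PySem.List.pyGetD [(-1 : Int), cols - 1, -1] 0 0 = -1 := by
        simp [PySem.List.pyGetD, PySem.List.pyIdx?]
      rw [h1]; simp
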